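-- pv_equiv track=rewrite | github.com/wmouwen/advent-of-code | 2025/3/solution.py | joltage
-- ===== SOURCE A (Python) =====
-- def joltage(batteries: list[int], n: int) -> int:
--     output = 0
--
--     while n > 0:
--         n -= 1
--         best = max(batteries[:-n] if n > 0 else batteries)
--         output = output * 10 + best
--         batteries = batteries[batteries.index(best) + 1 :]
--
--     return output
-- ===== SOURCE B (Python) =====
-- def joltage(batteries: list[int], n: int) -> int:
--     # Monotonic stack: one left-to-right pass keeping the lexicographically
--     # largest length-n subsequence, instead of re-slicing and re-scanning.
--     if n <= 0:
--         return 0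
--     drop = len(batteries) - n  # how many elements we may discard
--     stack = []
--     for x in batteries:
--         while drop and stack and stack[-1] < x:
--             stack.pop()
--             drop -= 1
--         stack.append(x)
--     output = 0
--     for d in stack[:n]:
--         output = output * 10 + d
--     return output
-- ===== Notes on version B (the rewrite author's own statement) =====
-- stated objective: faster
-- what changed: Replaced A's per-pick loop (each iteration re-slices, takes max and list.index over the remaining list) by a single monotonic-stack pass that keeps the lexicographically largest length-n subsequence.
import Mathlib
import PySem

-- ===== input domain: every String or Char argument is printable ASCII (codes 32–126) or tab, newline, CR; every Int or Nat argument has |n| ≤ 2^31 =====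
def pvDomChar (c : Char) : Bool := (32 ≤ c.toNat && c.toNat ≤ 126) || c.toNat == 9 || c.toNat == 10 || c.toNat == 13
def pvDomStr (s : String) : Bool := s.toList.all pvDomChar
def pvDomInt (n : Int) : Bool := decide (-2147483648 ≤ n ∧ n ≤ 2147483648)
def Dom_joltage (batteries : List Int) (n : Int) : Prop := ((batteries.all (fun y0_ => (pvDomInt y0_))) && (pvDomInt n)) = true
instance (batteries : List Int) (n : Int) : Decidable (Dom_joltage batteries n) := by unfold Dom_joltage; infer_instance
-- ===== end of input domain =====

-- B replaces A's per-pick max/index/slice rescans by a single monotonic-stack pass (asymptotically faster); equal output proved on Pre_.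


-- ===== PORT A =====
-- A's while-loop: n strictly decreases each pass, so n.toNat is exact fuel.
-- The `none` branches of max?/index? are Python's ValueError (outside Pre_).
def loopA (fuel : Nat) (output : Int) (batteries : List Int) (n : Int) : Int :=
  match fuel with
  | 0 => output
  | fuel + 1 =>
    if n > 0 then
      let n' := n - 1
      let window := if n' > 0 then PySem.List.slice batteries none (some (-n')) else batteries
      match PySem.List.max? window (fun y => y) with
      | none => 0
      | some best =>
        match PySem.List.index? batteries best with
        | none => 0
        | some idx =>
          loopA fuel (output * 10 + best)
            (PySem.List.slice batteries (some ((idx : Int) + 1)) none) n'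
    else output

def joltage (batteries : List Int) (n : Int) : Int :=
  loopA n.toNat 0 batteries n

-- ===== PORT B =====
-- stack held top-first (cons = append, tail = pop); Source B's final stack bottom-first is `.reverse`.
def popB (stack : List Int) (d : Int) (x : Int) : List Int × Int :=
  match stack with
  | [] => ([], d)
  | t :: rest => if d ≠ 0 ∧ t < x then popB rest (d - 1) x else (t :: rest, d)

def runB (stack : List Int) (d : Int) : List Int → List Int
  | [] => stack
  | x :: xs => runB (x :: (popB stack d x).1) (popB stack d x).2 xs

def joltage_alt (batteries : List Int) (n : Int) : Int :=
  if n ≤ 0 then 0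
  else
    ((runB [] ((batteries.length : Int) - n) batteries).reverse.take n.toNat).foldl
      (fun acc d => acc * 10 + d) 0

-- ===== PRECONDITION & SPEC =====
-- Pre_ excludes exactly the inputs where A raises ValueError (max() of an empty slice): 0 < n and n > len(batteries).
def Pre_joltage (batteries : List Int) (n : Int) : Prop :=
  n ≤ 0 ∨ n ≤ (batteries.length : Int)
instance (batteries : List Int) (n : Int) : Decidable (Pre_joltage batteries n) := by
  unfold Pre_joltage; infer_instance

def pvWitness_joltage : List Int × Int := ([3, 1, 4, 1, 5, 9, 2], 3)

def Spec_joltage (batteries : List Int) (n : Int) (out : Int) : Prop := out = joltage_alt batteries n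
instance (batteries : List Int) (n : Int) (out : Int) : Decidable (Spec_joltage batteries n out) := by unfold Spec_joltage; infer_instance

-- ===== CLAIM (what is proved, stated in full; the proofs are below) =====
def Claim_equal_joltage : Prop := ∀ (batteries : List Int) (n : Int), Dom_joltage batteries n → Pre_joltage batteries n → Spec_joltage batteries n (joltage batteries n)

-- ===== LEMMAS AND PROOFS =====

-- popB pops k ≤ min(|stack|, d) elements and charges them to the budget.
theorem popB_spec (s : List Int) (b x : Int) (hb : 0 ≤ b) :
    ∃ k : Nat, k ≤ s.length ∧ (k : Int) ≤ b ∧ popB s b x = (s.drop k, b - k) := by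
  induction s generalizing b with
  | nil => exact ⟨0, by simp, by simpa using hb, by simp [popB]⟩
  | cons t rest ih =>
    by_cases h : b ≠ 0 ∧ t < x
    · obtain ⟨k, hk1, hk2, hk3⟩ := ih (b - 1) (by omega)
      refine ⟨k + 1, by simpa using hk1, by push_cast; omega, ?_⟩
      simp [popB, h, hk3, Prod.ext_iff]
      omega
    · exact ⟨0, by simp, by simpa using hb, by simp [popB, h]⟩

-- a bottom element m shielded by budget ≤ height-above is never popped
theorem popB_append (s : List Int) (b x m : Int) (hb : 0 ≤ b)
    (hsh : m < x → b ≤ (s.length : Int)) :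
    popB (s ++ [m]) b x = ((popB s b x).1 ++ [m], (popB s b x).2) := by
  induction s generalizing b with
  | nil =>
    have : ¬ (b ≠ 0 ∧ m < x) := by
      rintro ⟨h1, h2⟩; have := hsh h2; simp at this; omega
    simp [popB, this]
  | cons t rest ih =>
    by_cases h : b ≠ 0 ∧ t < x
    · simp only [List.cons_append, popB, if_pos h]
      exact ih (b - 1) (by omega) (fun hx => by have := hsh hx; simp at this ⊢; omega)
    · simp [popB, h]

-- shield lemma: if every later element exceeding m sits beyond the remaining budget,
-- the bottom element m just rides along.
theorem runB_append (ys : List Int) (s : List Int) (b m : Int) (hb : 0 ≤ b)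
    (hsh : ∀ j (hj : j < ys.length), m < ys[j] → b ≤ (s.length : Int) + j) :
    runB (s ++ [m]) b ys = runB s b ys ++ [m] := by
  induction ys generalizing s b with
  | nil => simp [runB]
  | cons x ys ih =>
    obtain ⟨k, hk1, hk2, hk3⟩ := popB_spec s b x hb
    have hpa := popB_append s b x m hb (fun hx => by
      have := hsh 0 (by simp) (by simpa using hx); simpa using this)
    simp only [runB, hpa, hk3]
    have := ih (x :: s.drop k) (b - k) (by omega) (fun j hj hgt => by
      have := hsh (j + 1) (by simpa using Nat.succ_lt_succ hj) (by simpa using hgt)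
      simp [List.length_drop] at this ⊢
      omega)
    simpa using this

-- elements all < x with enough budget are fully popped
theorem popB_all (s : List Int) (b x : Int) (hlt : ∀ y ∈ s, y < x)
    (hb : (s.length : Int) ≤ b) : popB s b x = ([], b - s.length) := by
  induction s generalizing b with
  | nil => simp [popB]
  | cons t rest ih =>
    have h : b ≠ 0 ∧ t < x := ⟨by simp at hb; omega, hlt t (by simp)⟩
    simp only [popB, if_pos h]
    rw [ih (b - 1) (fun y hy => hlt y (by simp [hy])) (by simp at hb ⊢; omega)]
    simp [Prod.ext_iff]
    omega

-- prefix lemma: a run over zs ++ m :: ys with all of zs (and the stack) below m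
-- and enough budget leaves exactly [m] on the stack when m has been pushed.
theorem runB_prefix (zs : List Int) (s : List Int) (b m : Int) (ys : List Int)
    (hs : ∀ y ∈ s, y < m) (hz : ∀ y ∈ zs, y < m)
    (hb : (zs.length : Int) + s.length ≤ b) :
    runB s b (zs ++ m :: ys) = runB [m] (b - zs.length - s.length) ys := by
  induction zs generalizing s b with
  | nil =>
    simp only [List.nil_append, runB]
    rw [popB_all s b m hs (by simp at hb; omega)]
    simp
  | cons z zs ih =>
    have hb0 : 0 ≤ b := by simp at hb; omega
    obtain ⟨k, hk1, hk2, hk3⟩ := popB_spec s b z hb0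
    simp only [List.cons_append, runB, hk3]
    have hst : ∀ y ∈ z :: s.drop k, y < m := by
      intro y hy
      rcases List.mem_cons.1 hy with h | h
      · exact h ▸ hz z (by simp)
      · exact hs y (List.mem_of_mem_drop h)
    have key := ih (z :: s.drop k) (b - k) hst (fun y hy => hz y (by simp [hy]))
      (by simp [List.length_drop] at hb ⊢; omega)
    rw [key]
    have harith : (b : Int) - k - zs.length - ((z :: s.drop k).length)
        = b - (z :: zs).length - s.length := by
      simp [List.length_drop]
      omega
    rw [harith]

-- A's window batteries[:-n'] (or the whole list when n' = 0) is take (len - n')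
theorem window_eq (xs : List Int) (k : Nat) :
    (if ((k : Int)) > 0 then PySem.List.slice xs none (some (-(k : Int))) else xs)
      = xs.take (xs.length - k) := by
  match k with
  | 0 => simp
  | k + 1 =>
    rw [if_pos (by push_cast; omega), PySem.List.slice_to_neg_natCast xs (k+1) (by omega)]

-- decomposition: with m the max of the window and p its first index in xs,
-- one stack pass over xs equals m appended to a pass over the tail after p.
theorem runB_decomp (k : Nat) (xs : List Int) (m : Int) (p : Nat)
    (hk : k < xs.length)
    (hp : p < xs.length - k) (hpm : xs[p]'(by omega) = m)
    (hlt : ∀ i (hi : i < p), xs[i]'(by omega) < m)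
    (hle : ∀ i (hi : i < xs.length - k), xs[i]'(by omega) ≤ m) :
    runB [] ((xs.length : Int) - ((k : Int) + 1)) xs
      = runB [] (((xs.drop (p+1)).length : Int) - k) (xs.drop (p+1)) ++ [m] := by
  have hpl : p < xs.length := by omega
  have hsplit : xs = xs.take p ++ m :: xs.drop (p + 1) := by
    conv_lhs => rw [← List.take_append_drop p xs]
    rw [List.drop_eq_getElem_cons hpl, hpm]
  have hlen : (xs.drop (p+1)).length = xs.length - (p+1) := by simp
  have key := runB_prefix (xs.take p) [] ((xs.length : Int) - ((k : Int) + 1)) m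
      (xs.drop (p+1))
      (by simp)
      (fun y hy => by
        obtain ⟨i, hi, rfl⟩ := List.mem_take_iff_getElem.1 hy
        exact hlt i (by omega))
      (by simp [List.length_take]; omega)
  rw [← hsplit] at key
  rw [key]
  have hbud : (xs.length : Int) - ((k : Int) + 1) - ((xs.take p).length : Int)
      - (([] : List Int).length : Int) = ((xs.drop (p+1)).length : Int) - k := by
    simp [List.length_take, List.length_drop]
    omega
  rw [hbud]
  exact runB_append _ [] _ m (by simp [hlen]; omega) (fun j hj hgt => by
    have hidx : p + 1 + j < xs.length := by simp [hlen] at hj; omega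
    have hgl : (xs.drop (p+1))[j] = xs[p+1+j]'hidx := by
      simp [List.getElem_drop]
    by_contra hcon
    have hjw : p + 1 + j < xs.length - k := by
      simp [hlen] at hj hcon ⊢
      omega
    have := hle (p+1+j) hjw
    rw [hgl] at hgt
    omega)

-- main induction: A's greedy loop equals B's truncated stack, for any accumulator
theorem main_lemma (k : Nat) : ∀ (xs : List Int) (out : Int) (fuel : Nat),
    k ≤ fuel → k ≤ xs.length →
    loopA fuel out xs (k : Int)
      = ((runB [] ((xs.length : Int) - (k : Int)) xs).reverse.take k).foldl
          (fun acc d => acc * 10 + d) out := by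
  induction k with
  | zero =>
    intro xs out fuel _ _
    match fuel with
    | 0 => simp [loopA]
    | fuel + 1 => simp [loopA]
  | succ k ih =>
    intro xs out fuel hf hx
    obtain ⟨f, rfl⟩ : ∃ f, fuel = f + 1 := ⟨fuel - 1, by omega⟩
    have hn : ((k + 1 : Nat) : Int) > 0 := by push_cast; omega
    simp only [loopA, if_pos hn]
    have hnn : ((k + 1 : Nat) : Int) - 1 = (k : Int) := by push_cast; omega
    rw [hnn, window_eq xs k]
    -- the window is nonempty, so max? returns some m
    have hwlen : (xs.take (xs.length - k)).length = xs.length - k := by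
      simp only [List.length_take]
      omega
    have hwne : xs.take (xs.length - k) ≠ [] := by
      have hpos : 0 < (xs.take (xs.length - k)).length := by rw [hwlen]; omega
      exact List.ne_nil_of_length_pos hpos
    split
    case h_1 h => exact (hwne ((PySem.List.max?_eq_none_iff _ _).1 h)).elim
    case h_2 m hm =>
    have hmem : m ∈ xs := List.mem_of_mem_take (PySem.List.max?_mem hm)
    split
    case h_1 h2 =>
      exact (((PySem.List.index?_eq_none_iff xs m).1 h2) hmem).elim
    case h_2 p hp =>
    obtain ⟨hpl, hpeq, hpfst⟩ := PySem.List.getElem_of_index?_eq_some hp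
    have hle : ∀ i (hi : i < xs.length - k), xs[i]'(by omega) ≤ m := by
      intro i hi
      have hmem2 : xs[i]'(by omega) ∈ xs.take (xs.length - k) :=
        List.mem_take_iff_getElem.2 ⟨i, by omega, by simp⟩
      simpa using PySem.List.max?_isMax hm _ hmem2
    have hpw : p < xs.length - k := by
      by_contra hcon
      obtain ⟨i, hi, hieq⟩ := List.mem_take_iff_getElem.1 (PySem.List.max?_mem hm)
      exact hpfst i (by omega) (by simpa using hieq)
    have hlt : ∀ i (hi : i < p), xs[i]'(by omega) < m := by
      intro i hi
      have h1 := hle i (by omega)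
      have h2 := hpfst i hi
      omega
    -- A's slice batteries[idx+1:] is drop (p+1)
    have hslice : PySem.List.slice xs (some ((p : Int) + 1)) none = xs.drop (p + 1) := by
      rw [PySem.List.slice_from xs (by positivity)]
      norm_num
    rw [hslice]
    rw [ih (xs.drop (p+1)) (out * 10 + m) f (by omega) (by simp [List.length_drop]; omega)]
    have hcast : ((k+1 : Nat) : Int) = (k : Int) + 1 := by push_cast; ring
    rw [hcast, runB_decomp k xs m p (by omega) hpw hpeq hlt hle, List.reverse_append]
    simp [List.take_succ_cons]

-- ===== VERDICT (by name: the statement is the Claim_ definition above) =====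
theorem joltage_spec : Claim_equal_joltage := by
  intro batteries n _ hpre
  unfold Spec_joltage joltage joltage_alt
  by_cases hn : n ≤ 0
  · have h0 : n.toNat = 0 := by omega
    simp [h0, loopA, hn]
  · rw [if_neg hn]
    have hk : ((n.toNat : Nat) : Int) = n := by omega
    have hkl : n.toNat ≤ batteries.length := by
      rcases hpre with h | h
      · omega
      · omega
    have := main_lemma n.toNat batteries 0 n.toNat le_rfl hkl
    rw [hk] at this
    exact this
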